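-- pv_equiv track=rewrite | github.com/Julesc013/dominium | src/time/time_engine.py | _quantize_dt
-- ===== SOURCE A (Python) =====
-- from typing import Dict, List, Tuple
--
-- def _quantize_dt(target: int, allowed: List[int], default_dt: int, rounding_rule: str) -> int:
--     if target <= 0:
--         return 0
--     values = [int(token) for token in list(allowed or []) if int(token) > 0]
--     if not values:
--         return max(1, int(default_dt))
--     ordered = sorted(set(values))
--
--     if str(rounding_rule) == "round.exact_only":
--         if int(target) in ordered:
--             return int(target)
--         return max(1, int(default_dt))
--
--     # round.nearest.lower_tie default:
--     best = int(ordered[0])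
--     best_dist = abs(int(best) - int(target))
--     for token in ordered[1:]:
--         dist = abs(int(token) - int(target))
--         if dist < best_dist:
--             best = int(token)
--             best_dist = int(dist)
--             continue
--         if dist == best_dist and int(token) < best:
--             best = int(token)
--             best_dist = int(dist)
--     return max(1, int(best))
-- ===== SOURCE B (Python) =====
-- from bisect import bisect_left
-- from typing import List
--
-- def _quantize_dt(target: int, allowed: List[int], default_dt: int, rounding_rule: str) -> int:
--     if target <= 0:
--         return 0
--     ordered = sorted({int(v) for v in (allowed or []) if int(v) > 0})
--     if not ordered:
--         return max(1, int(default_dt))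
--     pos = bisect_left(ordered, target)
--     if str(rounding_rule) == "round.exact_only":
--         if pos < len(ordered) and ordered[pos] == target:
--             return target
--         return max(1, int(default_dt))
--     # round.nearest.lower_tie: only the two neighbours of the insertion point matter
--     if pos == 0:
--         return ordered[0]
--     if pos == len(ordered):
--         return ordered[-1]
--     lower, upper = ordered[pos - 1], ordered[pos]
--     return lower if target - lower <= upper - target else upper
-- ===== Notes on version B (the rewrite author's own statement) =====
-- stated objective: alternative
-- what changed: Replaces A's linear best/best_dist scan over all sorted candidates (with its lower-value tie rule) by a bisect_left lookup that compares only the two neighbours of the insertion point, ties broken toward the lower neighbour; the sort still dominates, so overall cost is unchanged.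
import Mathlib
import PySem

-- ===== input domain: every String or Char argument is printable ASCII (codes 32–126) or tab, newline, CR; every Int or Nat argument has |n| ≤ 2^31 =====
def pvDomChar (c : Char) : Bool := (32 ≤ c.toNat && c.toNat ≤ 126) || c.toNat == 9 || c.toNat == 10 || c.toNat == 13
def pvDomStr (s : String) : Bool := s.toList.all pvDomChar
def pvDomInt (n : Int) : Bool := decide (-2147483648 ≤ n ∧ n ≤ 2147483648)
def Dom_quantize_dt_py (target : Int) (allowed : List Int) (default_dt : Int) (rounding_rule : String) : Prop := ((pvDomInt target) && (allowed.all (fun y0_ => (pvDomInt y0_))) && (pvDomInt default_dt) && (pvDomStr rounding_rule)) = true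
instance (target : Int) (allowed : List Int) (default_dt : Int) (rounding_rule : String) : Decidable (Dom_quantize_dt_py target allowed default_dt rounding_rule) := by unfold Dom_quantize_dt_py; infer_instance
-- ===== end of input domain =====

-- B replaces A's linear scan of the sorted candidates with a bisect_left lookup
-- that compares only the two neighbours of the insertion point (objective: alternative).


-- ===== PORT A =====
def quantize_dt_py (target : Int) (allowed : List Int) (default_dt : Int) (rounding_rule : String) : Int :=
  if target ≤ 0 then 0
  else
    let values := allowed.filter (fun token => decide (0 < token))
    if values = [] then max 1 default_dt
    else
      let ordered := PySem.List.sorted (PySem.Set.ofList values) (fun x => x) false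
      if rounding_rule = "round.exact_only" then
        (if target ∈ ordered then target else max 1 default_dt)
      else
        -- best = ordered[0]; loop over ordered[1:]
        let b := PySem.List.pyGetD ordered 0 0
        let r := (PySem.List.slice ordered (some 1) none).foldl (fun (st : Int × Int) token =>
          let dist := |token - target|
          if dist < st.2 then (token, dist)
          else if dist = st.2 ∧ token < st.1 then (token, dist)
          else st) (b, |b - target|)
        max 1 r.1

-- ===== PORT B =====
def quantize_dt_py_alt (target : Int) (allowed : List Int) (default_dt : Int) (rounding_rule : String) : Int :=
  if target ≤ 0 then 0
  else
    let ordered := PySem.List.sorted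
      (PySem.Set.ofList (allowed.filter (fun v => decide (0 < v)))) (fun x => x) false
    if ordered = [] then max 1 default_dt
    else
      let pos := PySem.List.bisectLeft ordered target
      if rounding_rule = "round.exact_only" then
        (if pos < ordered.length ∧ ordered.getD pos 0 = target then target
         else max 1 default_dt)
      else
        if pos = 0 then ordered.getD 0 0
        else if pos = ordered.length then (ordered.getLast?).getD 0
        else
          let lower := ordered.getD (pos - 1) 0
          let upper := ordered.getD pos 0
          if target - lower ≤ upper - target then lower else upper

-- ===== PRECONDITION & SPEC =====
def Spec_quantize_dt_py (target : Int) (allowed : List Int) (default_dt : Int) (rounding_rule : String) (out : Int) : Prop := out = quantize_dt_py_alt target allowed default_dt rounding_rule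
instance (target : Int) (allowed : List Int) (default_dt : Int) (rounding_rule : String) (out : Int) : Decidable (Spec_quantize_dt_py target allowed default_dt rounding_rule out) := by unfold Spec_quantize_dt_py; infer_instance

-- ===== CLAIM (what is proved, stated in full; the proofs are below) =====
def Claim_equal_quantize_dt_py : Prop := ∀ (target : Int) (allowed : List Int) (default_dt : Int) (rounding_rule : String), Dom_quantize_dt_py target allowed default_dt rounding_rule → Spec_quantize_dt_py target allowed default_dt rounding_rule (quantize_dt_py target allowed default_dt rounding_rule)

-- ===== LEMMAS AND PROOFS =====

-- "y is no worse than z" in A's lexicographic order: nearer to t, or equally near and ≤.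
def KleOk (t y z : Int) : Prop := |y - t| < |z - t| ∨ (|y - t| = |z - t| ∧ y ≤ z)

theorem kle_refl (t y : Int) : KleOk t y y := Or.inr ⟨rfl, le_refl y⟩

theorem kle_antisymm {t y z : Int} (h1 : KleOk t y z) (h2 : KleOk t z y) : y = z := by
  rcases h1 with h | ⟨e, l⟩ <;> rcases h2 with h' | ⟨e', l'⟩ <;> omega

-- A's fold, with the running distance dropped (it is always |best - t|).
def amin (t : Int) (b : Int) (rest : List Int) : Int :=
  rest.foldl (fun best token =>
    if |token - t| < |best - t| ∨ (|token - t| = |best - t| ∧ token < best)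
    then token else best) b

theorem fold_eq_amin (t : Int) (b : Int) (rest : List Int) :
    rest.foldl (fun (st : Int × Int) token =>
      let dist := |token - t|
      if dist < st.2 then (token, dist)
      else if dist = st.2 ∧ token < st.1 then (token, dist)
      else st) (b, |b - t|) = (amin t b rest, |amin t b rest - t|) := by
  induction rest generalizing b with
  | nil => simp [amin]
  | cons x xs ih =>
    simp only [List.foldl_cons, amin]
    by_cases h1 : |x - t| < |b - t|
    · simpa [h1, amin] using ih x
    · by_cases h2 : |x - t| = |b - t| ∧ x < b
      · simpa [h1, h2, amin] using ih x
      · simpa [h1, h2, amin] using ih b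

theorem kle_trans {t a b c : Int} (h1 : KleOk t a b) (h2 : KleOk t b c) : KleOk t a c := by
  unfold KleOk at *; omega

-- the fold result is a member of the candidates and klex-minimal among them
theorem amin_spec (t : Int) (xs : List Int) :
    ∀ b, amin t b xs ∈ b :: xs ∧ ∀ y ∈ b :: xs, KleOk t (amin t b xs) y := by
  induction xs with
  | nil =>
    intro b
    refine ⟨by simp [amin], ?_⟩
    intro y hy; simp at hy; rw [hy]; exact kle_refl t b
  | cons x xs ih =>
    intro b
    by_cases hc : |x - t| < |b - t| ∨ (|x - t| = |b - t| ∧ x < b)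
    · have hstep : amin t b (x :: xs) = amin t x xs := by
        simp only [amin, List.foldl_cons, if_pos hc]
      obtain ⟨hm, hmin⟩ := ih x
      have hxb : KleOk t x b := by unfold KleOk; omega
      refine ⟨?_, ?_⟩
      · rw [hstep]
        rcases List.mem_cons.1 hm with h | h <;> simp [h]
      · intro y hy
        rw [hstep]
        rcases List.mem_cons.1 hy with h | hy'
        · rw [h]; exact kle_trans (hmin x (by simp)) hxb
        · exact hmin y hy'
    · have hstep : amin t b (x :: xs) = amin t b xs := by
        simp only [amin, List.foldl_cons, if_neg hc]
      obtain ⟨hm, hmin⟩ := ih b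
      have hbx : KleOk t b x := by unfold KleOk at *; omega
      refine ⟨?_, ?_⟩
      · rw [hstep]
        rcases List.mem_cons.1 hm with h | h <;> simp [h]
      · intro y hy
        rw [hstep]
        rcases List.mem_cons.1 hy with h | hy'
        · rw [h]; exact hmin b (by simp)
        · rcases List.mem_cons.1 hy' with h' | hy''
          · rw [h']; exact kle_trans (hmin b (by simp)) hbx
          · exact hmin y (by simp [hy''])

-- sorted list: getElem is monotone
theorem sorted_mono {L : List Int} (h : L.Pairwise (· < ·)) {i j : Nat}
    (hi : i < L.length) (hj : j < L.length) (hij : i ≤ j) : L[i] ≤ L[j] := by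
  rcases Nat.lt_or_ge i j with hlt | hge
  · exact le_of_lt ((List.pairwise_iff_getElem.1 h) i j hi hj hlt)
  · have : i = j := le_antisymm hij hge
    subst this; exact le_refl _

-- sign-resolved KleOk facts (omega cannot see through |.| on its own)
theorem kle_of_ge (t c y : Int) (hc : t ≤ c) (hy : t ≤ y) (h : c ≤ y) : KleOk t c y := by
  have e1 : |c - t| = c - t := abs_of_nonneg (by omega)
  have e2 : |y - t| = y - t := abs_of_nonneg (by omega)
  unfold KleOk; omega

theorem kle_of_le (t c y : Int) (hc : c < t) (hy : y < t) (h : y ≤ c) : KleOk t c y := by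
  have e1 : |c - t| = -(c - t) := abs_of_nonpos (by omega)
  have e2 : |y - t| = -(y - t) := abs_of_nonpos (by omega)
  unfold KleOk; omega

theorem kle_lower_upper (t lo y : Int) (hlo : lo < t) (hy : t ≤ y) (h : t - lo ≤ y - t) :
    KleOk t lo y := by
  have e1 : |lo - t| = -(lo - t) := abs_of_nonpos (by omega)
  have e2 : |y - t| = y - t := abs_of_nonneg (by omega)
  unfold KleOk; omega

theorem kle_upper_lower (t up y : Int) (hup : t ≤ up) (hy : y < t) (h : up - t < t - y) :
    KleOk t up y := by
  have e1 : |up - t| = up - t := abs_of_nonneg (by omega)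
  have e2 : |y - t| = -(y - t) := abs_of_nonpos (by omega)
  unfold KleOk; omega

-- B's neighbour choice, named (zeta-equal to the default branch of the port of B)
def bchoice (t : Int) (L : List Int) : Int :=
  let pos := PySem.List.bisectLeft L t
  if pos = 0 then L.getD 0 0
  else if pos = L.length then (L.getLast?).getD 0
  else if t - L.getD (pos - 1) 0 ≤ L.getD pos 0 - t then L.getD (pos - 1) 0
  else L.getD pos 0

-- B's neighbour choice is klex-minimal over a strictly sorted list.
theorem bchoice_min (t : Int) (L : List Int) (hL : L ≠ [])
    (hs : L.Pairwise (· < ·)) :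
    bchoice t L ∈ L ∧ ∀ y ∈ L, KleOk t (bchoice t L) y := by
  unfold bchoice
  set pos := PySem.List.bisectLeft L t with hpos
  have hle : L.Pairwise (· ≤ ·) := hs.imp (fun h => le_of_lt h)
  obtain ⟨hpl, hlo, hhi⟩ := PySem.List.bisectLeft_spec L t hle
  rw [← hpos] at hpl hlo hhi
  have hlen : 0 < L.length := List.length_pos_iff.2 hL
  have hmem : ∀ y ∈ L, ∃ j : Nat, ∃ hj : j < L.length, L[j] = y := by
    intro y hy; exact List.mem_iff_getElem.1 hy
  by_cases h0 : pos = 0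
  · -- all elements ≥ t
    rw [if_pos h0]
    have h0' : L.getD 0 0 = L[0] := List.getD_eq_getElem L 0 hlen
    constructor
    · rw [h0']; exact List.getElem_mem hlen
    · intro y hy
      obtain ⟨j, hj, rfl⟩ := hmem y hy
      have hyt : t ≤ L[j] := hhi j hj (by omega)
      have h0t : t ≤ L[0] := hhi 0 hlen (by omega)
      have hm : L[0] ≤ L[j] := sorted_mono hs hlen hj (Nat.zero_le j)
      rw [h0']; exact kle_of_ge t _ _ h0t hyt hm
  · by_cases hN : pos = L.length
    · -- all elements < t
      rw [if_neg h0, if_pos hN]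
      have hlast : (L.getLast?).getD 0 = L[L.length - 1] := by
        rw [List.getLast?_eq_getElem?, List.getElem?_eq_getElem (by omega)]
        rfl
      constructor
      · rw [hlast]; exact List.getElem_mem (by omega)
      · intro y hy
        obtain ⟨j, hj, rfl⟩ := hmem y hy
        have hyt : L[j] < t := hlo j hj (by omega)
        have hl2 : L[L.length - 1] < t := hlo _ (by omega) (by omega)
        have hm : L[j] ≤ L[L.length - 1] := sorted_mono hs hj (by omega) (by omega)
        rw [hlast]; exact kle_of_le t _ _ hl2 hyt hm
    · -- 0 < pos < len: genuine two-neighbour case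
      have hplt : pos < L.length := lt_of_le_of_ne hpl hN
      have hp1 : pos - 1 < L.length := by omega
      have hlow : L.getD (pos - 1) 0 = L[pos - 1] := List.getD_eq_getElem L _ hp1
      have hup : L.getD pos 0 = L[pos] := List.getD_eq_getElem L _ hplt
      have hlt : L[pos - 1] < t := hlo (pos - 1) hp1 (by omega)
      have hgt : t ≤ L[pos] := hhi pos hplt (by omega)
      rw [if_neg h0, if_neg hN, hlow, hup]
      have key : ∀ y ∈ L, y ≤ L[pos - 1] ∨ L[pos] ≤ y := by
        intro y hy
        obtain ⟨j, hj, rfl⟩ := hmem y hy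
        rcases Nat.lt_or_ge j pos with hjp | hjp
        · refine Or.inl (sorted_mono hs hj hp1 (by omega))
        · refine Or.inr (sorted_mono hs hplt hj hjp)
      by_cases hcond : t - L[pos - 1] ≤ L[pos] - t
      · rw [if_pos hcond]
        refine ⟨List.getElem_mem hp1, ?_⟩
        intro y hy
        rcases key y hy with h | h
        · exact kle_of_le t _ _ hlt (by omega) h
        · exact kle_lower_upper t _ _ hlt (by omega) (by omega)
      · rw [if_neg hcond]
        refine ⟨List.getElem_mem hplt, ?_⟩
        intro y hy
        rcases key y hy with h | h
        · exact kle_upper_lower t _ _ hgt (by omega) (by omega)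
        · exact kle_of_ge t _ _ hgt (by omega) h

-- exact_only branch: membership test ↔ bisect probe, on a strictly sorted list
theorem exact_probe (t : Int) (L : List Int) (hs : L.Pairwise (· < ·)) :
    (PySem.List.bisectLeft L t < L.length ∧ L.getD (PySem.List.bisectLeft L t) 0 = t)
      ↔ t ∈ L := by
  have hle : L.Pairwise (· ≤ ·) := hs.imp (fun h => le_of_lt h)
  obtain ⟨hpl, hlo, hhi⟩ := PySem.List.bisectLeft_spec L t hle
  set pos := PySem.List.bisectLeft L t with hpos
  constructor
  · rintro ⟨hlt, heq⟩
    rw [List.getD_eq_getElem L _ hlt] at heq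
    rw [← heq]; exact List.getElem_mem hlt
  · intro ht
    obtain ⟨j, hj, hje⟩ := List.mem_iff_getElem.1 ht
    have hjp : pos ≤ j := by
      by_contra hc
      have := hlo j hj (by omega)
      omega
    have hplt : pos < L.length := by omega
    refine ⟨hplt, ?_⟩
    rw [List.getD_eq_getElem L _ hplt]
    have h1 : t ≤ L[pos] := hhi pos hplt (le_refl _)
    have h2 : L[pos] ≤ L[j] := sorted_mono hs hplt hj hjp
    omega

-- ===== VERDICT (by name: the statement is the Claim_ definition above) =====
theorem quantize_dt_py_spec : Claim_equal_quantize_dt_py := by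
  intro target allowed default_dt rounding_rule _
  unfold Spec_quantize_dt_py quantize_dt_py quantize_dt_py_alt
  by_cases ht : target ≤ 0
  · simp [ht]
  · rw [if_neg ht, if_neg ht]
    set values := allowed.filter (fun token => decide (0 < token)) with hv
    set ordered := PySem.List.sorted (PySem.Set.ofList values) (fun x => x) false with hord
    have hs : ordered.Pairwise (· < ·) := PySem.List.sorted_ofList_pairwise_lt values
    have hmemo : ∀ y, y ∈ ordered ↔ y ∈ values := by
      intro y
      rw [hord, PySem.List.mem_sorted, PySem.Set.mem_ofList]
    have hne : values = [] ↔ ordered = [] := by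
      constructor
      · intro h; rw [List.eq_nil_iff_forall_not_mem]; intro x hx
        have := (hmemo x).1 hx; rw [h] at this; simp at this
      · intro h; rw [List.eq_nil_iff_forall_not_mem]; intro x hx
        have := (hmemo x).2 hx; rw [h] at this; simp at this
    by_cases hv0 : values = []
    · simp [hv0, hne.1 hv0]
    · have ho0 : ¬ ordered = [] := fun h => hv0 (hne.2 h)
      rw [if_neg hv0, if_neg ho0]
      by_cases hr : rounding_rule = "round.exact_only"
      · rw [if_pos hr, if_pos hr]
        simp only [exact_probe target ordered hs]
        simp only [hord]
      · rw [if_neg hr, if_neg hr]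
        obtain ⟨hcm, hcmin⟩ := bchoice_min target ordered ho0 hs
        obtain ⟨b, rest, hOL⟩ := List.exists_cons_of_ne_nil ho0
        rw [hord] at hOL
        simp only [hord, hOL] at hcm hcmin ⊢
        simp only [PySem.List.pyGetD_zero_cons, PySem.List.slice_from_one, List.tail_cons]
        rw [fold_eq_amin]
        obtain ⟨ham, hamin⟩ := amin_spec target rest b
        have hbc : (if PySem.List.bisectLeft (b :: rest) target = 0 then (b :: rest).getD 0 0
             else if PySem.List.bisectLeft (b :: rest) target = (b :: rest).length then
               ((b :: rest).getLast?).getD 0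
             else if target - (b :: rest).getD (PySem.List.bisectLeft (b :: rest) target - 1) 0 ≤
                 (b :: rest).getD (PySem.List.bisectLeft (b :: rest) target) 0 - target then
               (b :: rest).getD (PySem.List.bisectLeft (b :: rest) target - 1) 0
             else (b :: rest).getD (PySem.List.bisectLeft (b :: rest) target) 0)
            = bchoice target (b :: rest) := rfl
        rw [hbc]
        have heq : amin target b rest = bchoice target (b :: rest) :=
          kle_antisymm (hamin _ hcm) (hcmin _ ham)
        rw [← heq]
        -- max 1 (amin …) = amin … : every candidate is positive
        have hposv : 0 < amin target b rest := by
          have := (hmemo (amin target b rest)).1 (by simp only [hord, hOL]; exact ham)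
          rw [hv] at this
          simpa using (List.mem_filter.1 this).2
        omega
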